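-- pv_equiv track=rewrite | github.com/frankylamps/python-project-lvl2 | gendiff/formatters/plain/rendering_and_gendiff_tool.py | get_unique_path
-- ===== SOURCE A (Python) =====
-- def get_unique_path(path, paths):
--     """Get the unique part of the path amoung all paths.
--
--     Args:
--         path (str): e.g. 'foo.bar.baz.foo'
--         paths (list): e.g. ['foo', 'bar.eggz']
--
--     Returns:
--         str: e.g. "foo.bar"
--     """
--     splitted_path = path.split('.')
--     path_length = len(splitted_path)
--     counter = 1
--     while counter <= path_length:
--         found = False
--         for new_path in paths:
--             if '.'.join(splitted_path[: counter]) in new_path: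
--                 if new_path.index('.'.join(splitted_path[: counter])) == 0:
--                     found = True
--         if not found:
--             return '.'.join(splitted_path[: counter])
--         counter += 1
-- ===== SOURCE B (Python) =====
-- def get_unique_path(path, paths):
--     """Shortest dotted prefix of `path` that no string in `paths` starts with.
--
--     One pass over `paths`: for each candidate string compute how many leading
--     dotted components of `path` it starts with; the answer is the prefix one
--     component longer than the best such match (None if that exceeds the path).
--     """
--     parts = path.split('.')
--     n = len(parts)
--     best = 0
--     for p in paths:
--         c = 0
--         while c < n and p.startswith('.'.join(parts[:c + 1])):
--             c += 1
--         best = max(best, c)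
--     k = best + 1
--     if k <= n:
--         return '.'.join(parts[:k])
--     return None
-- ===== Notes on version B (the rewrite author's own statement) =====
-- stated objective: simpler
-- what changed: Replaces A's while-loop that re-scans all paths for each growing prefix (with substring search + index==0) with a single pass over paths computing each path's maximal matching component count via startswith, then a closed-form answer index best+1.
import Mathlib
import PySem

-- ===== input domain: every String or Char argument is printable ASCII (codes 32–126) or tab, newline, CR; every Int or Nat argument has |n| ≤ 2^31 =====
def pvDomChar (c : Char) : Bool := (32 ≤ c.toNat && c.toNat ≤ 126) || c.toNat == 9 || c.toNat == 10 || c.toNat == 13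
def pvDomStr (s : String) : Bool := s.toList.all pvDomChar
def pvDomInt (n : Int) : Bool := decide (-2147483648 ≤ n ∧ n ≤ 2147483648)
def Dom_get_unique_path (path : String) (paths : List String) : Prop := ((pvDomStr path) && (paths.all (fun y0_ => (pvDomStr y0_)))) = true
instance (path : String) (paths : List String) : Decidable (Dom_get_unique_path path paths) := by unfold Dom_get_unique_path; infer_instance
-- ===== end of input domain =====

-- B replaces A's per-prefix re-scan of all paths by one pass computing each path's
-- maximal matching component count, then a closed-form answer index (objective: simpler).

-- ===== PORT A =====
-- shared fragment of both Pythons: '.'.join(parts[:c])  (xs[:c] with 0 ≤ c is List.take)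
def pvPrefix (sp : List (List Char)) (c : Nat) : List Char :=
  PySem.Chars.join ".".toList (sp.take c)

-- A's while-loop over counter = 1, …, path_length; inner for sets found via
-- 'prefix in new_path' and 'new_path.index(prefix) == 0' (index = find here: it is
-- evaluated only under the 'in' guard, where Python's .index equals .find)
def get_unique_path_loop (sp : List (List Char)) (paths : List String) (counter : Nat) :
    Option (List Char) :=
  if counter ≤ sp.length then
    let pre := pvPrefix sp counter
    let found := paths.foldl (fun found new_path =>
      if PySem.Chars.isIn pre new_path.toList then
        if PySem.Chars.find new_path.toList pre == 0 then true else found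
      else found) false
    if found then get_unique_path_loop sp paths (counter + 1) else some pre
  else none
termination_by sp.length + 1 - counter

def get_unique_path (path : String) (paths : List String) : Option String :=
  (get_unique_path_loop (PySem.Chars.splitOn path.toList ".".toList) paths 1).map String.ofList

-- ===== PORT B =====
-- B's inner while: largest c with c < n and p.startswith('.'.join(parts[:c+1]))
def pvMatchLen (sp : List (List Char)) (p : List Char) (c : Nat) : Nat :=
  if c < sp.length ∧ PySem.Chars.startswith p (pvPrefix sp (c + 1)) = true then
    pvMatchLen sp p (c + 1)
  else c
termination_by sp.length - c

def get_unique_path_alt (path : String) (paths : List String) : Option String :=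
  let parts := PySem.Chars.splitOn path.toList ".".toList
  let n := parts.length
  let best := paths.foldl (fun b p => max b (pvMatchLen parts p.toList 0)) 0
  let k := best + 1
  if k ≤ n then some (String.ofList (pvPrefix parts k)) else none

-- ===== PRECONDITION & SPEC =====
def Spec_get_unique_path (path : String) (paths : List String) (out : Option String) : Prop := out = get_unique_path_alt path paths
instance (path : String) (paths : List String) (out : Option String) : Decidable (Spec_get_unique_path path paths out) := by unfold Spec_get_unique_path; infer_instance

-- ===== CLAIM (what is proved, stated in full; the proofs are below) =====
def Claim_equal_get_unique_path : Prop := ∀ (path : String) (paths : List String), Dom_get_unique_path path paths → Spec_get_unique_path path paths (get_unique_path path paths)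

-- ===== LEMMAS AND PROOFS =====

theorem pvJoin_snoc (sep : List Char) (l : List (List Char)) (x : List Char) (hl : l ≠ []) :
    PySem.Chars.join sep (l ++ [x]) = PySem.Chars.join sep l ++ sep ++ x := by
  induction l with
  | nil => exact absurd rfl hl
  | cons a t ih =>
    cases t with
    | nil => simp [PySem.Chars.join_cons_cons, PySem.Chars.join_singleton]
    | cons b u =>
      have h1 : (a :: b :: u) ++ [x] = a :: b :: (u ++ [x]) := by simp
      have h2 : b :: (u ++ [x]) = (b :: u) ++ [x] := by simp
      rw [h1, PySem.Chars.join_cons_cons, h2, ih (by simp), PySem.Chars.join_cons_cons]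
      simp

theorem pvPrefix_step (sp : List (List Char)) (c : Nat) (h : c < sp.length) :
    pvPrefix sp c <+: pvPrefix sp (c + 1) := by
  have ht : sp.take (c + 1) = sp.take c ++ [sp[c]] := by
    rw [List.take_add_one]
    simp [List.getElem?_eq_getElem h]
  rcases Nat.eq_zero_or_pos c with hc | hc
  · subst hc
    simp [pvPrefix, PySem.Chars.join_nil]
  · have hne : sp.take c ≠ [] := by
      have : (sp.take c).length = c := List.length_take_of_le (by omega)
      intro he; rw [he] at this; simp at this; omega
    unfold pvPrefix
    rw [ht, pvJoin_snoc _ _ _ hne]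
    exact ⟨".".toList ++ sp[c], by simp⟩

theorem pvPrefix_mono (sp : List (List Char)) (i j : Nat) (hij : i ≤ j) (hj : j ≤ sp.length) :
    pvPrefix sp i <+: pvPrefix sp j := by
  induction j, hij using Nat.le_induction with
  | base => exact List.prefix_refl _
  | succ j hij ih =>
    exact (ih (by omega)).trans (pvPrefix_step sp j (by omega))

theorem pvFind_eq_zero (p pre : List Char) (h : pre <+: p) : PySem.Chars.find p pre = 0 := by
  have hnn : 0 ≤ PySem.Chars.find p pre := (PySem.Chars.find_nonneg_iff _ _).2 h.isInfix
  have hs := PySem.Chars.find_spec hnn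
  by_contra hne
  have hpos : 0 < (PySem.Chars.find p pre).toNat := by omega
  exact hs.2 0 hpos (by simpa using h)

-- A's inner condition on one path equals 'pre is a prefix of p'
theorem pvBody_eq (pre p : List Char) (b : Bool) :
    (if PySem.Chars.isIn pre p then
      if PySem.Chars.find p pre == 0 then true else b
    else b) = (b || decide (pre <+: p)) := by
  by_cases h : pre <+: p
  · have h1 : PySem.Chars.isIn pre p = true := (PySem.Chars.isIn_iff_infix _ _).2 h.isInfix
    simp [h1, pvFind_eq_zero p pre h, h]
  · by_cases h2 : PySem.Chars.isIn pre p = true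
    · have hf : PySem.Chars.find p pre ≠ 0 := by
        intro he
        have hs := (PySem.Chars.find_spec (s := p) (sub := pre) (by rw [he])).1
        rw [he] at hs
        exact h (by simpa using hs)
      simp [h2, hf, h]
    · simp [h2, h]

theorem pvFound_iff (pre : List Char) (paths : List String) (b : Bool) :
    paths.foldl (fun found new_path =>
      if PySem.Chars.isIn pre new_path.toList then
        if PySem.Chars.find new_path.toList pre == 0 then true else found
      else found) b
    = (b || paths.any (fun p => decide (pre <+: p.toList))) := by
  induction paths generalizing b with
  | nil => simp
  | cons p t ih =>
    rw [List.foldl_cons, pvBody_eq, ih]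
    simp [Bool.or_assoc]

theorem pvMatchLen_ge (sp : List (List Char)) (p : List Char) (c : Nat) :
    c ≤ pvMatchLen sp p c := by
  fun_induction pvMatchLen with
  | case1 c h ih => omega
  | case2 c h => omega

theorem pvMatchLen_le (sp : List (List Char)) (p : List Char) (c : Nat) (hc : c ≤ sp.length) :
    pvMatchLen sp p c ≤ sp.length := by
  fun_induction pvMatchLen with
  | case1 c h ih => exact ih (by omega)
  | case2 c h => omega

theorem pvMatchLen_prefix (sp : List (List Char)) (p : List Char) (c : Nat) :
    pvMatchLen sp p c = c ∨ pvPrefix sp (pvMatchLen sp p c) <+: p := by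
  fun_induction pvMatchLen with
  | case1 c h ih =>
    rcases ih with he | hp
    · rw [he]
      exact Or.inr (by rw [he] at *; exact (PySem.Chars.startswith_iff _ _).1 h.2)
    · exact Or.inr hp
  | case2 c h => exact Or.inl rfl

theorem pvMatchLen_max (sp : List (List Char)) (p : List Char) (k : Nat)
    (hk : k ≤ sp.length) (hp : pvPrefix sp k <+: p) :
    ∀ c, c ≤ k → k ≤ pvMatchLen sp p c := by
  intro c hck
  fun_induction pvMatchLen with
  | case1 c h ih =>
    rcases Nat.lt_or_ge c k with hlt | hge
    · exact ih (by omega)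
    · calc k ≤ c + 1 := by omega
        _ ≤ pvMatchLen sp p (c + 1) := pvMatchLen_ge sp p (c + 1)
  | case2 c h =>
    rcases Nat.lt_or_ge c k with hlt | hge
    · exfalso
      apply h
      refine ⟨by omega, (PySem.Chars.startswith_iff _ _).2 ?_⟩
      exact (pvPrefix_mono sp (c + 1) k (by omega) hk).trans hp
    · exact hge

-- facts about B's fold computing the maximum match length
theorem pvBest_ge_init (sp : List (List Char)) (l : List String) (b : Nat) :
    b ≤ l.foldl (fun b p => max b (pvMatchLen sp p.toList 0)) b := by
  induction l generalizing b with
  | nil => simp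
  | cons p t ih => exact le_trans (le_max_left _ _) (ih _)

theorem pvBest_ge_mem (sp : List (List Char)) (l : List String) (b : Nat) (p : String)
    (hp : p ∈ l) :
    pvMatchLen sp p.toList 0 ≤ l.foldl (fun b p => max b (pvMatchLen sp p.toList 0)) b := by
  induction l generalizing b with
  | nil => simp at hp
  | cons q t ih =>
    rcases List.mem_cons.1 hp with rfl | hp
    · exact le_trans (le_max_right _ _) (pvBest_ge_init sp t _)
    · exact ih _ hp

theorem pvBest_cases (sp : List (List Char)) (l : List String) (b : Nat) :
    l.foldl (fun b p => max b (pvMatchLen sp p.toList 0)) b = b ∨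
    ∃ p ∈ l, l.foldl (fun b p => max b (pvMatchLen sp p.toList 0)) b = pvMatchLen sp p.toList 0 := by
  induction l generalizing b with
  | nil => exact Or.inl rfl
  | cons q t ih =>
    rw [List.foldl_cons]
    rcases ih (max b (pvMatchLen sp q.toList 0)) with he | ⟨p, hp, he⟩
    · rcases Nat.le_total b (pvMatchLen sp q.toList 0) with hb | hb
      · exact Or.inr ⟨q, by simp, by rw [he]; omega⟩
      · exact Or.inl (by rw [he]; omega)
    · exact Or.inr ⟨p, by simp [hp], he⟩

theorem pvBest_le (sp : List (List Char)) (l : List String) :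
    l.foldl (fun b p => max b (pvMatchLen sp p.toList 0)) 0 ≤ sp.length := by
  rcases pvBest_cases sp l 0 with he | ⟨p, _, he⟩
  · omega
  · rw [he]; exact pvMatchLen_le sp p.toList 0 (by omega)

-- A's loop, entered at any counter 1 ≤ c ≤ best+1, computes B's closed-form answer
theorem pvLoop_eq (sp : List (List Char)) (paths : List String) (c : Nat)
    (hc1 : 1 ≤ c)
    (hck : c ≤ paths.foldl (fun b p => max b (pvMatchLen sp p.toList 0)) 0 + 1) :
    get_unique_path_loop sp paths c =
      (if paths.foldl (fun b p => max b (pvMatchLen sp p.toList 0)) 0 + 1 ≤ sp.length then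
        some (pvPrefix sp (paths.foldl (fun b p => max b (pvMatchLen sp p.toList 0)) 0 + 1))
      else none) := by
  set best := paths.foldl (fun b p => max b (pvMatchLen sp p.toList 0)) 0 with hbest
  rw [get_unique_path_loop]
  by_cases hcl : c ≤ sp.length
  · rw [if_pos hcl]
    simp only [pvFound_iff, Bool.false_or]
    by_cases hcb : c ≤ best
    · -- some path matches prefix c: found = true, recurse
      have hfound : paths.any (fun p => decide (pvPrefix sp c <+: p.toList)) = true := by
        rcases pvBest_cases sp paths 0 with he | ⟨p, hp, he⟩
        · omega
        · have hml : c ≤ pvMatchLen sp p.toList 0 := by omega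
          have hmlL : pvMatchLen sp p.toList 0 ≤ sp.length :=
            pvMatchLen_le sp p.toList 0 (by omega)
          rcases pvMatchLen_prefix sp p.toList 0 with h0 | hpre
          · omega
          · have : pvPrefix sp c <+: p.toList :=
              (pvPrefix_mono sp c _ hml hmlL).trans hpre
            exact List.any_eq_true.2 ⟨p, hp, by simpa using this⟩
      rw [hfound, if_pos rfl]
      exact pvLoop_eq sp paths (c + 1) (by omega) (by omega)
    · -- c = best + 1: no path matches prefix c, return it
      have hceq : c = best + 1 := by omega
      have hfound : paths.any (fun p => decide (pvPrefix sp c <+: p.toList)) = false := by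
        rw [List.any_eq_false]
        intro p hp hdec
        have hpre : pvPrefix sp c <+: p.toList := by simpa using hdec
        have : c ≤ pvMatchLen sp p.toList 0 :=
          pvMatchLen_max sp p.toList c hcl hpre 0 (by omega)
        have : pvMatchLen sp p.toList 0 ≤ best := pvBest_ge_mem sp paths 0 p hp
        omega
      rw [hfound]
      simp only [Bool.false_eq_true, if_false]
      rw [if_pos (by omega : best + 1 ≤ sp.length), hceq]
  · rw [if_neg hcl]
    have hbl : best ≤ sp.length := pvBest_le sp paths
    rw [if_neg (by omega)]
termination_by paths.foldl (fun b p => max b (pvMatchLen sp p.toList 0)) 0 + 1 - c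

-- ===== VERDICT (by name: the statement is the Claim_ definition above) =====
theorem get_unique_path_spec : Claim_equal_get_unique_path := by
  intro path paths _
  unfold Spec_get_unique_path get_unique_path get_unique_path_alt
  rw [pvLoop_eq _ _ 1 le_rfl (by omega)]
  simp only [show (".".toList : List Char) = ['.'] from rfl]
  split <;> simp
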